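-- pv_equiv track=rewrite | github.com/gumaonelove/ege_2021 | numbers/22 number/1.py | f
-- ===== SOURCE A (Python) =====
-- def f(x):
--     a = 0
--     b = 0
--     while x > 0:
--         c = x % 10
--         a += c
--         if c > b:
--             b = c
--         x //= 10
--     return (a,b)
-- ===== SOURCE B (Python) =====
-- def f(x):
--     if x <= 0:
--         return (0, 0)
--     digits = [ord(d) - 48 for d in str(x)]
--     return (sum(digits), max(digits))
-- ===== Notes on version B (the rewrite author's own statement) =====
-- stated objective: idiomatic
-- what changed: B derives the digits from the decimal string representation (str/ord) and applies library reductions sum and max to the digit list, instead of A's mod/floordiv while-loop with running sum and max accumulators.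
import Mathlib
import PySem

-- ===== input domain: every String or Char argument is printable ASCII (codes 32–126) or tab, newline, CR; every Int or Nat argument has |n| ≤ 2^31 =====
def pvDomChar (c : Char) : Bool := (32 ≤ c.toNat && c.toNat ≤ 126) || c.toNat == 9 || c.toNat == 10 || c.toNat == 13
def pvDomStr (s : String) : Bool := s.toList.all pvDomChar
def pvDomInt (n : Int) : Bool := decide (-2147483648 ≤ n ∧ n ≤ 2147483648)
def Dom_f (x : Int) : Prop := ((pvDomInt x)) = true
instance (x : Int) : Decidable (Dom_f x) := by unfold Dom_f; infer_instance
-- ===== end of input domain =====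

-- B derives the digits from the decimal string representation (str/ord) and uses library
-- reductions sum/max instead of A's %10-//10 accumulator loop; same cost, more idiomatic.


-- ===== PORT A =====
-- the while loop with state (x, a, b)
def fLoop (x a b : Int) : Int × Int :=
  if _h : 0 < x then
    let c := PySem.Int.mod x 10
    fLoop (PySem.Int.floordiv x 10) (a + c) (if c > b then c else b)
  else (a, b)
termination_by x.toNat
decreasing_by
  have h10 : PySem.Int.floordiv x 10 = x / 10 := Int.fdiv_eq_ediv_of_nonneg _ (by norm_num)
  rw [h10]
  omega

def f (x : Int) : Int × Int := fLoop x 0 0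

-- ===== PORT B =====
def f_alt (x : Int) : Int × Int :=
  if x ≤ 0 then (0, 0)
  else
    let digits := (PySem.Int.toStr x).toList.map (fun d => ((d.toNat : Int) - 48))
    -- `digits` is nonempty here, so Python's max(digits) returns; `.getD 0` is never the default
    (digits.sum, (PySem.List.max? digits id).getD 0)

-- ===== PRECONDITION & SPEC =====
def Spec_f (x : Int) (out : Int × Int) : Prop := out = f_alt x
instance (x : Int) (out : Int × Int) : Decidable (Spec_f x out) := by unfold Spec_f; infer_instance

-- ===== CLAIM (what is proved, stated in full; the proofs are below) =====
def Claim_equal_f : Prop := ∀ (x : Int), Dom_f x → Spec_f x (f x)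

-- ===== LEMMAS AND PROOFS =====

lemma digitChar_val {d : Nat} (h : d < 10) :
    ((Nat.digitChar d).toNat : Int) - 48 = (d : Int) := by
  interval_cases d <;> decide

lemma toDigitsCore_eq : ∀ (n fuel : Nat) (ds : List Char), 0 < n → n < fuel →
    Nat.toDigitsCore 10 fuel n ds = ((Nat.digits 10 n).map Nat.digitChar).reverse ++ ds := by
  intro n
  induction n using Nat.strong_induction_on with
  | _ n ih =>
    intro fuel ds hn hfuel
    match fuel with
    | fuel + 1 =>
      rw [Nat.toDigitsCore]
      by_cases h10 : n / 10 = 0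
      · simp only [h10, if_pos]
        rw [Nat.digits_def' (by norm_num) hn, h10, Nat.digits_zero]
        simp
      · simp only [h10, if_false]
        have hlt : n / 10 < n := Nat.div_lt_self hn (by norm_num)
        rw [ih (n / 10) hlt fuel _ (Nat.pos_of_ne_zero h10) (by omega)]
        rw [Nat.digits_def' (by norm_num) hn]
        simp

lemma toStr_pos (x : Int) (h : 0 < x) :
    (PySem.Int.toStr x).toList = ((Nat.digits 10 x.toNat).map Nat.digitChar).reverse := by
  have hx : ¬ x < 0 := by omega
  have hpos : 0 < x.toNat := by omega
  simp only [PySem.Int.toStr, PySem.Int.toChars, if_neg hx, Nat.toDigits]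
  rw [toDigitsCore_eq x.toNat (x.toNat + 1) [] hpos (by omega)]
  simp

lemma pymod_natCast (n : Nat) : PySem.Int.mod ((n : Int)) 10 = ((n % 10 : Nat) : Int) := by
  unfold PySem.Int.mod
  rw [Int.fmod_eq_emod]
  simp

lemma pydiv_natCast (n : Nat) : PySem.Int.floordiv ((n : Int)) 10 = ((n / 10 : Nat) : Int) := by
  unfold PySem.Int.floordiv
  rw [Int.fdiv_eq_ediv_of_nonneg _ (by norm_num)]
  omega

lemma fLoop_eq (n : Nat) : ∀ (a b : Int), fLoop (n : Int) a b =
    (a + ((Nat.digits 10 n).map (fun d : Nat => (d : Int))).sum,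
     ((Nat.digits 10 n).map (fun d : Nat => (d : Int))).foldl (fun b c => if c > b then c else b) b) := by
  induction n using Nat.strong_induction_on with
  | _ n ih =>
    intro a b
    by_cases hn : 0 < n
    · have hx : (0 : Int) < (n : Int) := by exact_mod_cast hn
      rw [fLoop, dif_pos hx, pymod_natCast, pydiv_natCast,
        ih (n / 10) (Nat.div_lt_self hn (by norm_num)),
        Nat.digits_def' (by norm_num) hn]
      simp [add_assoc]
    · have h0 : n = 0 := by omega
      subst h0
      rw [fLoop]
      simp

lemma foldl_max_shift (l : List Int) : ∀ (a x : Int),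
    l.foldl max (max a x) = max (l.foldl max a) x := by
  induction l with
  | nil => intro a x; simp
  | cons y ys ih =>
    intro a x
    simp only [List.foldl_cons]
    rw [max_right_comm, ih]

lemma foldl_max_reverse (l : List Int) : ∀ (a : Int),
    l.reverse.foldl max a = l.foldl max a := by
  induction l with
  | nil => intro a; simp
  | cons y ys ih =>
    intro a
    simp only [List.reverse_cons, List.foldl_append, List.foldl_cons, List.foldl_nil]
    rw [ih, ← foldl_max_shift]

lemma max?_cons : ∀ (rs : List Int) (r : Int),
    PySem.List.max? (r :: rs) id = some (rs.foldl max r) := by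
  intro rs
  induction rs with
  | nil => intro r; simp [PySem.List.max?]
  | cons y ys ih =>
    intro r
    have h1 : PySem.List.max? (r :: y :: ys) id =
        PySem.List.max? ((if id r < id y then y else r) :: ys) id := by
      simp only [PySem.List.max?, List.foldl_cons]
      congr 1
      split_ifs <;> rfl
    have h2 : (if id r < id y then y else r) = max r y := by
      simp only [id_eq]
      split_ifs with h
      · exact (max_eq_right h.le).symm
      · exact (max_eq_left (not_lt.1 h)).symm
    rw [h1, h2, ih, List.foldl_cons]

lemma step_eq_max : (fun (b c : Int) => if c > b then c else b) = max := by
  funext b c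
  split_ifs with h
  · exact (max_eq_right h.le).symm
  · exact (max_eq_left (not_lt.1 h)).symm

-- ===== VERDICT (by name: the statement is the Claim_ definition above) =====
theorem f_spec : Claim_equal_f := by
  intro x _
  unfold Spec_f f f_alt
  by_cases hle : x ≤ 0
  · rw [fLoop, dif_neg (by omega), if_pos hle]
  · have hx : 0 < x := by omega
    obtain ⟨n, rfl⟩ : ∃ m : Nat, x = (m : Int) := ⟨x.toNat, by omega⟩
    have hnpos : 0 < n := by omega
    rw [if_neg hle]
    have hmap : ((PySem.Int.toStr (n : Int)).toList).map (fun d => ((d.toNat : Int) - 48)) =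
        ((Nat.digits 10 n).map (fun d : Nat => (d : Int))).reverse := by
      rw [toStr_pos _ hx, List.map_reverse, List.map_map, Int.toNat_natCast]
      congr 1
      apply List.map_congr_left
      intro d hd
      exact digitChar_val (Nat.digits_lt_base (by norm_num) hd)
    rw [fLoop_eq n 0 0]
    simp only [hmap, zero_add]
    have hne : ((Nat.digits 10 n).map (fun d : Nat => (d : Int))).reverse ≠ [] := by
      have hd : Nat.digits 10 n ≠ [] := Nat.digits_ne_nil_iff_ne_zero.mpr (by omega)
      simpa using hd
    obtain ⟨r, rs, hcons⟩ := List.exists_cons_of_ne_nil hne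
    have hr0 : 0 ≤ r := by
      have hm : r ∈ ((Nat.digits 10 n).map (fun d : Nat => (d : Int))).reverse := by
        rw [hcons]; exact List.mem_cons_self
      rw [List.mem_reverse] at hm
      obtain ⟨d, _, rfl⟩ := List.mem_map.mp hm
      simp
    rw [Prod.mk.injEq]
    constructor
    · rw [List.sum_reverse]
    · rw [hcons, max?_cons, Option.getD_some, step_eq_max,
        ← foldl_max_reverse, hcons, List.foldl_cons, max_eq_right hr0]
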